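-- pv_equiv track=rewrite | github.com/kochetkovandrew/projecteuler | 001-050/eu035.py | circulars
-- ===== SOURCE A (Python) =====
-- def circulars(n):
--     digcnt = 0
--     tmp = n
--     res = []
--     while tmp > 0:
--         digcnt += 1
--         tmp //= 10
--     tmp = n
--     for i in range(0, digcnt):
--         res.append(tmp)
--         dig = tmp % 10
--         tmp //= 10
--         tmp += dig * 10 ** (digcnt - 1)
--     return res
-- ===== SOURCE B (Python) =====
-- def circulars(n):
--     if n <= 0:
--         return []
--     d = len(str(n))
--     return [n // 10 ** i + n % 10 ** i * 10 ** (d - i) for i in range(d)]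
-- ===== Notes on version B (the rewrite author's own statement) =====
-- stated objective: simpler
-- what changed: Replaces A's two dependent loops (a digit-count loop plus a stateful loop rotating a running value once per step) with a guard, len(str(n)) for the digit count, and a single stateless comprehension computing each rotation independently by a closed form splitting n at a power of ten.
import Mathlib
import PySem

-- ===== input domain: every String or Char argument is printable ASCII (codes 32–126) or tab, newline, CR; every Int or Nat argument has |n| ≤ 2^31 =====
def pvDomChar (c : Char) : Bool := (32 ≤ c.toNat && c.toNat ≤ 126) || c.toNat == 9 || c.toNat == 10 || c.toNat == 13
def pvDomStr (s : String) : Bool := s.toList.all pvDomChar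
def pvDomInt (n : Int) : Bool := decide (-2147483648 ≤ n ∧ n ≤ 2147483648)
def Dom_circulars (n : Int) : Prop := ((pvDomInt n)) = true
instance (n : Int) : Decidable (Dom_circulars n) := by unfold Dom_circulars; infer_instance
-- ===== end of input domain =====

-- B replaces A's two dependent loops by a guard plus one stateless comprehension
-- (closed-form rotation per index); equivalence of return values is proved below.

-- ===== PORT A =====
-- the 'while tmp > 0: digcnt += 1; tmp //= 10' loop
def circulars_digcnt (tmp : Int) : Nat :=
  if h : tmp > 0 then circulars_digcnt (PySem.Int.floordiv tmp 10) + 1 else 0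
termination_by tmp.toNat
decreasing_by
  rw [PySem.Int.floordiv_eq_ediv_of_pos (by norm_num : (0:Int) < 10)]
  omega

def circulars (n : Int) : List Int :=
  let digcnt := circulars_digcnt n
  ((PySem.List.pyRange 0 (digcnt : Int) 1).foldl
    (fun (st : List Int × Int) _ =>
      -- res.append(tmp); dig = tmp % 10; tmp //= 10; tmp += dig * 10 ** (digcnt - 1)
      (st.1 ++ [st.2],
       PySem.Int.floordiv st.2 10 + PySem.Int.mod st.2 10 * 10 ^ (digcnt - 1)))
    ([], n)).1

-- ===== PORT B =====
def circulars_alt (n : Int) : List Int :=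
  if n ≤ 0 then []
  else
    let d := (PySem.Int.toChars n).length   -- len(str(n))
    (List.range d).map (fun i =>
      PySem.Int.floordiv n (10 ^ i) + PySem.Int.mod n (10 ^ i) * 10 ^ (d - i))

-- ===== PRECONDITION & SPEC =====
def Spec_circulars (n : Int) (out : List Int) : Prop := out = circulars_alt n
instance (n : Int) (out : List Int) : Decidable (Spec_circulars n out) := by unfold Spec_circulars; infer_instance

-- ===== CLAIM (what is proved, stated in full; the proofs are below) =====
def Claim_equal_circulars : Prop := ∀ (n : Int), Dom_circulars n → Spec_circulars n (circulars n)

-- ===== LEMMAS AND PROOFS =====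

-- digit count on Nat, matching A's loop
def natDigCnt (m : Nat) : Nat :=
  if h : 0 < m then natDigCnt (m / 10) + 1 else 0

theorem circulars_digcnt_eq_nat (n : Int) : circulars_digcnt n = natDigCnt n.toNat := by
  rw [circulars_digcnt]
  by_cases h : n > 0
  · rw [dif_pos h]
    have hfd : PySem.Int.floordiv n 10 = n / 10 :=
      PySem.Int.floordiv_eq_ediv_of_pos (by norm_num)
    have ih := circulars_digcnt_eq_nat (PySem.Int.floordiv n 10)
    rw [ih, hfd]
    have h1 : (n / 10).toNat = n.toNat / 10 := by omega
    rw [h1]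
    conv_rhs => rw [natDigCnt]
    rw [dif_pos (by omega : 0 < n.toNat)]
  · rw [dif_neg h]
    have : n.toNat = 0 := by omega
    rw [this, natDigCnt]; simp
termination_by n.toNat
decreasing_by
  rw [PySem.Int.floordiv_eq_ediv_of_pos (by norm_num : (0:Int) < 10)]
  omega

-- exact length of Nat.toDigits for positive numbers
theorem toDigitsCore_len (f : Nat) : ∀ m : Nat, 0 < m → m < f →
    (Nat.toDigitsCore 10 f m []).length = natDigCnt m := by
  induction f with
  | zero => intro m hm hf; omega
  | succ f ih =>
    intro m hm hf
    rw [natDigCnt, dif_pos hm]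
    show (Nat.toDigitsCore 10 (f + 1) m []).length = _
    rw [Nat.toDigitsCore]
    by_cases h : m / 10 = 0
    · simp [h, natDigCnt]
    · rw [if_neg h]
      rw [Nat.toDigitsCore_lens_eq 10 f (m / 10) _ []]
      rw [ih (m / 10) (by omega) (by omega)]

theorem toChars_length (n : Int) (hn : 0 < n) :
    (PySem.Int.toChars n).length = natDigCnt n.toNat := by
  rw [PySem.Int.toChars, if_neg (by omega : ¬ n < 0)]
  exact toDigitsCore_len (n.toNat + 1) n.toNat (by omega) (by omega)

-- the closed-form rotation B computes
def pvRot (n : Int) (d i : Nat) : Int := n / 10 ^ i + n % 10 ^ i * 10 ^ (d - i)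

theorem pvRot_zero (n : Int) (d : Nat) : pvRot n d 0 = n := by
  simp [pvRot]

-- one iteration of A's rotation step sends pvRot i to pvRot (i+1)
theorem pvRot_step (n : Int) (d i : Nat) (hi : i + 1 ≤ d) :
    pvRot n d i / 10 + pvRot n d i % 10 * 10 ^ (d - 1) = pvRot n d (i + 1) := by
  have hp : (0:Int) < 10 ^ i := by positivity
  obtain ⟨e, he⟩ : ∃ e, d - i = e + 1 := ⟨d - i - 1, by omega⟩
  have hd1 : d - 1 = i + e := by omega
  have hdi1 : d - (i + 1) = e := by omega
  have hq10 : n / 10 ^ i / 10 * 10 + n / 10 ^ i % 10 = n / 10 ^ i := by omega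
  have hqm0 : (0:Int) ≤ n / 10 ^ i % 10 := by omega
  have hqm10 : n / 10 ^ i % 10 < 10 := by omega
  have hr0 : (0:Int) ≤ n % 10 ^ i := Int.emod_nonneg n (by omega)
  have hrp : n % 10 ^ i < 10 ^ i := Int.emod_lt_of_pos n hp
  have hb : (0:Int) < 10 ^ i * 10 := by positivity
  -- division and remainder of n by 10 ^ (i+1) = 10 ^ i * 10, by uniqueness
  have hdm : n / (10 ^ i * 10) = n / 10 ^ i / 10 ∧
      n % (10 ^ i * 10) = n / 10 ^ i % 10 * 10 ^ i + n % 10 ^ i := by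
    rw [Int.ediv_emod_unique hb]
    refine ⟨by linear_combination Int.mul_ediv_add_emod n (10 ^ i) + (10:Int) ^ i * hq10,
      add_nonneg (mul_nonneg hqm0 hp.le) hr0, ?_⟩
    have h9 : n / 10 ^ i % 10 * 10 ^ i ≤ 9 * 10 ^ i :=
      mul_le_mul_of_nonneg_right (by omega) hp.le
    linarith
  have hdiv : pvRot n d i / 10 = n / 10 ^ i / 10 + n % 10 ^ i * 10 ^ e := by
    rw [pvRot, he, pow_succ, ← mul_assoc, Int.add_mul_ediv_right _ _ (by norm_num : (10:Int) ≠ 0)]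
  have hmod : pvRot n d i % 10 = n / 10 ^ i % 10 := by
    rw [pvRot, he, pow_succ, ← mul_assoc, Int.add_mul_emod_self_right _ _ _]
  rw [hdiv, hmod, pvRot, pow_succ, hdm.1, hdm.2, hdi1, hd1, pow_add]
  ring

-- A's loop, unrolled: after folding over any k-element list it holds the rotations 0..k-1
theorem circulars_loop (n : Int) (d : Nat) (k : Nat) (hk : k ≤ d) (l : List Int) (hl : l.length = k) :
    (l.foldl
      (fun (st : List Int × Int) _ =>
        (st.1 ++ [st.2],
         PySem.Int.floordiv st.2 10 + PySem.Int.mod st.2 10 * 10 ^ (d - 1)))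
      ([], n)) = ((List.range k).map (pvRot n d), pvRot n d k) := by
  induction l using List.reverseRecOn generalizing k with
  | nil =>
    simp at hl
    subst hl
    simp [pvRot_zero]
  | append_singleton xs x ih =>
    simp at hl
    obtain ⟨k', rfl⟩ : ∃ k', k = k' + 1 := ⟨xs.length, by omega⟩
    rw [List.foldl_append, ih k' (by omega) (by omega)]
    simp only [List.foldl_cons, List.foldl_nil]
    rw [PySem.Int.floordiv_eq_ediv_of_pos (by norm_num),
        PySem.Int.mod_eq_emod_of_pos (by norm_num),
        pvRot_step n d k' (by omega),
        List.range_succ, List.map_append]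
    simp

theorem pyRange_len (d : Nat) : (PySem.List.pyRange 0 (d : Int) 1).length = d := by
  rw [PySem.List.pyRange_zero_natCast]
  simp

theorem circulars_spec_aux (n : Int) : circulars n = circulars_alt n := by
  by_cases h : n ≤ 0
  · rw [circulars, circulars_alt, if_pos h]
    have h0 : circulars_digcnt n = 0 := by rw [circulars_digcnt, dif_neg (by omega)]
    simp [h0, PySem.List.pyRange]
  · rw [not_le] at h
    rw [circulars, circulars_alt, if_neg (by omega)]
    have hd : (PySem.Int.toChars n).length = circulars_digcnt n := by
      rw [toChars_length n h, circulars_digcnt_eq_nat]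
    simp only [hd]
    set d := circulars_digcnt n with hddef
    rw [circulars_loop n d d (le_refl d) _ (pyRange_len d)]
    apply List.map_congr_left
    intro i hi
    have hip : (0:Int) < 10 ^ i := by positivity
    rw [PySem.Int.floordiv_eq_ediv_of_pos hip, PySem.Int.mod_eq_emod_of_pos hip, pvRot]

-- ===== VERDICT (by name: the statement is the Claim_ definition above) =====
theorem circulars_spec : Claim_equal_circulars := by
  intro n _
  exact circulars_spec_aux n
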